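-- pv_equiv track=rewrite | github.com/marcosdidier/sitecin | lista 4/o_resgate.py | desafio2
-- ===== SOURCE A (Python) =====
-- def desafio2(palavra_y):
--     palavra_tratada = palavra_y.lower()
--     tamanho = int(len(palavra_tratada))
--     #Parte do código que obtém uma sequência de Fibonacci de acordo com o tamanho da palavra
--     sequencia_fibonacci = [0, 1]
--     numero_fibonacci = 0
--     for i in range(tamanho - 1):
--         sequencia_fibonacci.append(sequencia_fibonacci[-1] + sequencia_fibonacci[-2])
--     numero_fibonacci = sequencia_fibonacci[-1]
--     #Caso haja vogais na palavra, multiplicamos o último número da sequência por 4, senão, multiplicamos por 2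
--     for letras in palavra_tratada:
--         if letras in 'aeiou':
--             coordenada_y = numero_fibonacci * 4
--             break
--         else:
--             coordenada_y = numero_fibonacci * 2
--     return(coordenada_y)
-- ===== SOURCE B (Python) =====
-- def desafio2(palavra_y):
--     palavra = palavra_y.lower()
--
--     def fib_pair(n):
--         # fast doubling: returns (F(n), F(n+1))
--         if n == 0:
--             return (0, 1)
--         a, b = fib_pair(n >> 1)
--         c = a * (2 * b - a)
--         d = a * a + b * b
--         return (d, c + d) if n & 1 else (c, d)
--
--     numero_fibonacci = fib_pair(len(palavra))[0]
--     return numero_fibonacci * (4 if any(ch in 'aeiou' for ch in palavra) else 2)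
-- ===== Notes on version B (the rewrite author's own statement) =====
-- stated objective: faster
-- what changed: Replaces the O(n)-addition list-building Fibonacci loop (quadratic in bit operations) and the break-driven vowel loop with O(log n) fast-doubling Fibonacci and a single any() vowel scan.
import Mathlib
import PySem

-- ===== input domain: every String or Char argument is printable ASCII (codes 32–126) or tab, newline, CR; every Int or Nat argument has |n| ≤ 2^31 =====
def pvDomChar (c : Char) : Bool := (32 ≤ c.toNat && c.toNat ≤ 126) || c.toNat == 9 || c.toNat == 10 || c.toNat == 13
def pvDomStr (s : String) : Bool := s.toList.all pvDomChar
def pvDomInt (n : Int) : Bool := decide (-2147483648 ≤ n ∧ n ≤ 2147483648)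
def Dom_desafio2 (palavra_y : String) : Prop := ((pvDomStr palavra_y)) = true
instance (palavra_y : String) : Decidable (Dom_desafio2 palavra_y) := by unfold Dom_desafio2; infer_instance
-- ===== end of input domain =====

-- B replaces A's list-building Fibonacci loop and break-driven vowel loop by fast-doubling
-- Fibonacci plus a single any-scan (objective: faster, asymptotic in a timing run).

-- ===== PORT A =====
def pvVowelsA : List Char := ['a', 'e', 'i', 'o', 'u']

-- one iteration of A's Fibonacci loop body: sequencia.append(sequencia[-1] + sequencia[-2])
def pvFibStepA (seq : List Int) (_i : Int) : List Int :=
  seq ++ [PySem.List.pyGetD seq (-1) 0 + PySem.List.pyGetD seq (-2) 0]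

-- A's second loop with its break: returns none exactly when the word is empty
-- (Python: coordenada_y never assigned → NameError, excluded by Pre_)
def pvLoopA (fibn : Int) (acc : Option Int) : List Char → Option Int
  | [] => acc
  | c :: cs =>
    if pvVowelsA.contains c then some (fibn * 4)
    else pvLoopA fibn (some (fibn * 2)) cs

def desafio2 (palavra_y : String) : Int :=
  let palavra_tratada := PySem.Chars.lower palavra_y.toList   -- palavra_y.lower()
  let tamanho : Int := PySem.Chars.len palavra_tratada
  let sequencia := (PySem.List.pyRange 0 (tamanho - 1) 1).foldl pvFibStepA [0, 1]
  let numero_fibonacci := PySem.List.pyGetD sequencia (-1) 0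
  (pvLoopA numero_fibonacci none palavra_tratada).getD 0   -- none = NameError, outside Pre_

-- ===== PORT B =====
-- (shares the vowel-list constant pvVowelsA with port A)

-- fast doubling: returns (F(n), F(n+1))
def pvFibPair (n : Nat) : Int × Int :=
  if h : n = 0 then (0, 1)
  else
    let p := pvFibPair (n / 2)
    let c := p.1 * (2 * p.2 - p.1)
    let d := p.1 * p.1 + p.2 * p.2
    if n % 2 = 1 then (d, c + d) else (c, d)
termination_by n
decreasing_by exact Nat.div_lt_self (Nat.pos_of_ne_zero h) (by omega)

def desafio2_alt (palavra_y : String) : Int :=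
  let palavra := PySem.Chars.lower palavra_y.toList
  let numero_fibonacci := (pvFibPair palavra.length).1
  numero_fibonacci * (if palavra.any (fun c => pvVowelsA.contains c) then 4 else 2)

-- ===== PRECONDITION & SPEC =====
-- Pre_ excludes only the empty string, on which A raises NameError (coordenada_y unassigned).
def Pre_desafio2 (palavra_y : String) : Prop := palavra_y ≠ ""
instance (palavra_y : String) : Decidable (Pre_desafio2 palavra_y) := by unfold Pre_desafio2; infer_instance

def pvWitness_desafio2 : String := ("casa")

def Spec_desafio2 (palavra_y : String) (out : Int) : Prop := out = desafio2_alt palavra_y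
instance (palavra_y : String) (out : Int) : Decidable (Spec_desafio2 palavra_y out) := by unfold Spec_desafio2; infer_instance

-- ===== CLAIM (what is proved, stated in full; the proofs are below) =====
def Claim_equal_desafio2 : Prop := ∀ (palavra_y : String), Dom_desafio2 palavra_y → Pre_desafio2 palavra_y → Spec_desafio2 palavra_y (desafio2 palavra_y)

-- ===== LEMMAS AND PROOFS =====

-- the reference Fibonacci over Int
def pvFib (n : Nat) : Int := (Nat.fib n : Int)

theorem pvFibPair_eq (n : Nat) : pvFibPair n = (pvFib n, pvFib (n + 1)) := by
  induction n using Nat.strong_induction_on with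
  | _ n ih =>
    rw [pvFibPair]
    by_cases h : n = 0
    · subst h; simp [pvFib]
    · simp only [h, dif_neg, not_false_iff]
      set m := n / 2 with hm
      rw [ih m (Nat.div_lt_self (Nat.pos_of_ne_zero h) (by omega))]
      have hfle : Nat.fib m ≤ 2 * Nat.fib (m + 1) :=
        le_trans (Nat.fib_le_fib_succ) (by omega)
      have A2 : (Nat.fib (2 * m) : Int) =
          pvFib m * (2 * pvFib (m + 1) - pvFib m) := by
        simp only [pvFib]
        rw [Nat.fib_two_mul, Nat.cast_mul, Nat.cast_sub hfle]; push_cast; ring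
      have A3 : (Nat.fib (2 * m + 1) : Int) = pvFib m * pvFib m + pvFib (m + 1) * pvFib (m + 1) := by
        simp only [pvFib]
        rw [Nat.fib_two_mul_add_one]; push_cast; ring
      have A4 : (Nat.fib (2 * m + 2) : Int) = (Nat.fib (2 * m) : Int) + (Nat.fib (2 * m + 1) : Int) := by
        rw [Nat.fib_add_two]; push_cast; ring
      by_cases hp : n % 2 = 1
      · have hn : n = 2 * m + 1 := by omega
        rw [if_pos hp]
        refine Prod.ext ?_ ?_ <;> simp only
        · rw [hn]; show _ = pvFib (2 * m + 1)
          simp only [pvFib]; rw [A3]; simp [pvFib]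
        · have h1 : n + 1 = 2 * m + 2 := by omega
          rw [h1]; show _ = pvFib (2 * m + 2)
          simp only [pvFib]; rw [A4, A2, A3]; simp only [pvFib]
      · have hn : n = 2 * m := by omega
        rw [if_neg hp]
        refine Prod.ext ?_ ?_ <;> simp only
        · rw [hn]; show _ = pvFib (2 * m)
          simp only [pvFib]; rw [A2]; simp [pvFib]
        · have h1 : n + 1 = 2 * m + 1 := by omega
          rw [h1]; show _ = pvFib (2 * m + 1)
          simp only [pvFib]; rw [A3]; simp [pvFib]

-- A's Fibonacci loop builds exactly [F(0), F(1), …, F(k+1)]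
theorem pvFibLoop_eq (k : Nat) :
    (PySem.List.pyRange 0 (k : Int) 1).foldl pvFibStepA [0, 1] =
      (List.range (k + 2)).map pvFib := by
  induction k with
  | zero => simp [PySem.List.pyRange, List.range_succ, pvFib]
  | succ k ih =>
    rw [show ((k + 1 : Nat) : Int) = (k : Int) + 1 by push_cast; ring,
        PySem.List.pyRange_one_succ_right (by positivity), List.foldl_append, ih]
    set L := (List.range (k + 2)).map pvFib with hL
    have hlen : L.length = k + 2 := by simp [hL]
    have h1 : PySem.List.pyGetD L (-1) 0 = pvFib (k + 1) := by
      rw [PySem.List.pyGetD_neg_ofNat L 1 0 (by omega) (by omega)]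
      simp [hL, pvFib]
    have h2 : PySem.List.pyGetD L (-2) 0 = pvFib k := by
      rw [PySem.List.pyGetD_neg_ofNat L 2 0 (by omega) (by omega)]
      simp [hL, pvFib]
    simp only [List.foldl_cons, List.foldl_nil, pvFibStepA, h1, h2]
    rw [show k + 2 + 1 = (k + 2) + 1 by ring, List.range_succ, List.map_append]
    congr 1
    simp [pvFib, Nat.fib_add_two]
    ring

-- A's break loop after the first character = f * (4 if any vowel else 2)
theorem pvLoopA_some (f : Int) (cs : List Char) :
    pvLoopA f (some (f * 2)) cs =
      some (f * (if cs.any (fun c => pvVowelsA.contains c) then 4 else 2)) := by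
  induction cs with
  | nil => simp [pvLoopA]
  | cons c cs ih =>
    by_cases h : c ∈ pvVowelsA
    · simp [pvLoopA, h]
    · simp [pvLoopA, h, ih]

theorem pvLoopA_cons (f : Int) (c : Char) (cs : List Char) :
    pvLoopA f none (c :: cs) =
      some (f * (if (c :: cs).any (fun x => pvVowelsA.contains x) then 4 else 2)) := by
  by_cases h : c ∈ pvVowelsA
  · simp [pvLoopA, h]
  · simp [pvLoopA, h, pvLoopA_some]

-- ===== VERDICT (by name: the statement is the Claim_ definition above) =====
set_option maxRecDepth 8192 in
theorem desafio2_spec : Claim_equal_desafio2 := by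
  intro palavra_y _hdom hpre
  unfold Spec_desafio2
  simp only [desafio2, desafio2_alt]
  set pl := PySem.Chars.lower palavra_y.toList with hpl
  have hne : pl ≠ [] := by
    simp only [hpl, PySem.Chars.lower]
    intro h
    exact hpre (by
      have := congrArg List.length h
      simp at this
      exact String.ext (by simpa using this))
  obtain ⟨c, cs, hcc⟩ := List.exists_cons_of_ne_nil hne
  have hm1 : 1 ≤ pl.length := by rw [hcc]; simp
  have htam : PySem.Chars.len pl - 1 = ((pl.length - 1 : Nat) : Int) := by
    simp [PySem.Chars.len]; omega
  rw [htam, pvFibLoop_eq]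
  have hlast : PySem.List.pyGetD ((List.range (pl.length - 1 + 2)).map pvFib) (-1) 0
      = pvFib pl.length := by
    set L := (List.range (pl.length - 1 + 2)).map pvFib with hL
    have hlen : L.length = pl.length - 1 + 2 := by simp [hL]
    rw [PySem.List.pyGetD_neg_ofNat L 1 0 (by omega) (by omega)]
    simp only [hL]
    rw [List.getElem_map, List.getElem_range]
    congr 1
    simp
    omega
  rw [hlast, hcc, pvLoopA_cons, pvFibPair_eq]
  rfl
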